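-- pv_equiv track=rewrite | github.com/ISeeBugsEverywhere/LinuxOscilloscope | Scripts/output_formatter.py | get_oo_jj
-- ===== SOURCE A (Python) =====
-- def get_oo_jj(_array:list):
--     """
--     TODO: not finished
--     :param _array:
--     :return:
--     """
--     _l = len(_array) # how many arrays inside?
--     _l_array = []
--     _oo = []
--     for i in range(0, _l):
--         _l_array.append(len(_array[i]))
--     mx = max(_l_array)
--     for i in range(0, mx):
--         _string = ""
--         for m in range(0, _l):
--             _string = _string + str((_array[m][i]))
--         _oo.append(_string)
--     return _oo
-- ===== SOURCE B (Python) =====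
-- def get_oo_jj(_array: list):
--     # Row-major single pass: preallocate one accumulator per column and grow
--     # all columns simultaneously while sweeping the rows once, instead of A's
--     # column-by-column restart over all rows for each output string.
--     mx = max(len(row) for row in _array)
--     oo = [''] * mx
--     for row in _array:
--         for i in range(mx):
--             oo[i] += str(row[i])
--     return oo
-- ===== Notes on version B (the rewrite author's own statement) =====
-- stated objective: alternative
-- what changed: Swaps the traversal: instead of A's column-major nested loops that rebuild each output string by re-scanning all rows, B preallocates mx column accumulators and fills all of them in one row-major sweep over the input.
import Mathlib
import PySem

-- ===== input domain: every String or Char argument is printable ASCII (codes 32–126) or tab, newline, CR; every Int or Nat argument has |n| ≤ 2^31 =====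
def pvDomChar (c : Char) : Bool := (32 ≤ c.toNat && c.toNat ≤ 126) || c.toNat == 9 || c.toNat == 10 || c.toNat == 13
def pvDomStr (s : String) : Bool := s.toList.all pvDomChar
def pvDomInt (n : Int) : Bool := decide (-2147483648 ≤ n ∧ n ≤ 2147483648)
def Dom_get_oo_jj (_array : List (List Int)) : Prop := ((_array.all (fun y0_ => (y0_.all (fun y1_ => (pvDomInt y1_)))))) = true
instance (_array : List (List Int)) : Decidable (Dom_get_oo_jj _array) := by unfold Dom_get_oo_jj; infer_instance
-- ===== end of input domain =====

-- B replaces A's column-major nested loops (rebuild each output string by re-scanning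
-- all rows) with a single row-major sweep filling mx preallocated column accumulators
-- (objective: alternative decomposition; same asymptotic cost).

-- ===== PORT A =====
def get_oo_jj (_array : List (List Int)) : List String :=
  let _l : Int := _array.length
  let _l_array : List Int :=
    (PySem.List.pyRange 0 _l).foldl
      (fun acc i => acc ++ [((PySem.List.pyGetD _array i []).length : Int)]) []
  -- max(_l_array): raises ValueError on empty input; Pre_ excludes _array = []
  let mx : Int := (PySem.List.max? _l_array (fun y => y)).getD 0
  (PySem.List.pyRange 0 mx).foldl
    (fun _oo i =>
      _oo ++ [(PySem.List.pyRange 0 _l).foldl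
        (fun _string m =>
          _string ++ PySem.Int.toStr (PySem.List.pyGetD (PySem.List.pyGetD _array m []) i 0)) ""]) []

-- ===== PORT B =====
def get_oo_jj_alt (_array : List (List Int)) : List String :=
  -- mx = max(len(row) for row in _array); raises ValueError on empty input (Pre_ excludes it)
  let mx : Int := (PySem.List.max? (_array.map (fun row => (row.length : Int))) (fun y => y)).getD 0
  -- oo = [''] * mx
  let oo0 : List String := List.replicate mx.toNat ""
  -- for row in _array: for i in range(mx): oo[i] += str(row[i])
  _array.foldl
    (fun oo row =>
      (List.range mx.toNat).foldl
        (fun oo i => oo.set i (oo.getD i "" ++ PySem.Int.toStr (PySem.List.pyGetD row (i : Int) 0))) oo)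
    oo0

-- ===== PRECONDITION & SPEC =====
-- Pre_ excludes exactly the inputs where A raises (and B raises identically): the empty
-- list (max() of an empty sequence, ValueError) and ragged inputs (IndexError).
def Pre_get_oo_jj (_array : List (List Int)) : Prop :=
  _array ≠ [] ∧ ∀ r ∈ _array, r.length = (_array.headD []).length
instance (_array : List (List Int)) : Decidable (Pre_get_oo_jj _array) := by
  unfold Pre_get_oo_jj; infer_instance
def pvWitness_get_oo_jj : List (List Int) := [[1, -2], [30, 4]]

def Spec_get_oo_jj (_array : List (List Int)) (out : List String) : Prop := out = get_oo_jj_alt _array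
instance (_array : List (List Int)) (out : List String) : Decidable (Spec_get_oo_jj _array out) := by unfold Spec_get_oo_jj; infer_instance

-- ===== CLAIM (what is proved, stated in full; the proofs are below) =====
def Claim_equal_get_oo_jj : Prop := ∀ (_array : List (List Int)), Dom_get_oo_jj _array → Pre_get_oo_jj _array → Spec_get_oo_jj _array (get_oo_jj _array)

-- ===== LEMMAS AND PROOFS =====

-- the common value of one output column: the concatenation of str(v) for v in vals
def colCat (vals : List Int) (init : String) : String :=
  vals.foldl (fun s v => s ++ PySem.Int.toStr v) init

theorem foldl_append_singleton {α β : Type} (l : List α) (f : α → β) (init : List β) :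
    l.foldl (fun acc x => acc ++ [f x]) init = init ++ l.map f := by
  induction l generalizing init with
  | nil => simp
  | cons x t ih => simp [List.foldl_cons, ih, List.append_assoc]

theorem foldl_max_const (l : List Int) (c : Int) (h : ∀ x ∈ l, x = c) :
    l.foldl max c = c := by
  induction l with
  | nil => rfl
  | cons x t ih =>
    have hx : x = c := h x (by simp)
    simp [List.foldl_cons, hx, max_self]
    exact ih (fun y hy => h y (by simp [hy]))

theorem getD_map_range (N : Nat) (g : Nat → String) (i : Nat) (hi : i < N) :
    ((List.range N).map g).getD i "" = g i := by
  rw [List.getD_eq_getElem?_getD]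
  simp [hi]

theorem set_map_range (N : Nat) (g : Nat → String) (i : Nat) (v : String) :
    ((List.range N).map g).set i v
      = (List.range N).map (fun k => if k = i then v else g k) := by
  apply List.ext_getElem
  · simp
  · intro k h1 h2
    have hk : k < N := by simpa using h2
    simp only [List.getElem_set, List.getElem_map, List.getElem_range]
    rcases eq_or_ne k i with h | h
    · simp [h]
    · simp [h, Ne.symm h]

theorem inner_fold (N : Nat) (g : Nat → String) (f : Nat → String) (n : Nat) (hn : n ≤ N) :
    (List.range n).foldl (fun oo i => oo.set i (oo.getD i "" ++ f i)) ((List.range N).map g)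
      = (List.range N).map (fun k => if k < n then g k ++ f k else g k) := by
  induction n with
  | zero => simp
  | succ n ih =>
    rw [List.range_succ, List.foldl_append, ih (by omega)]
    simp only [List.foldl_cons, List.foldl_nil]
    rw [getD_map_range N _ n (by omega), set_map_range]
    apply List.map_congr_left
    intro k hk
    have hkN : k < N := by simpa using hk
    by_cases h1 : k = n
    · subst h1; simp
    · by_cases h2 : k < n <;> simp [h1, h2] <;> omega

theorem outer_fold (rows : List (List Int)) (n : Nat) (h : ∀ r ∈ rows, r.length = n)
    (g : Nat → String) :
    rows.foldl
      (fun oo row =>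
        (List.range n).foldl
          (fun oo i => oo.set i (oo.getD i "" ++ PySem.Int.toStr (PySem.List.pyGetD row (i : Int) 0))) oo)
      ((List.range n).map g)
      = (List.range n).map (fun k => colCat (rows.map (fun r => r.getD k 0)) (g k)) := by
  induction rows generalizing g with
  | nil => simp [colCat]
  | cons r t ih =>
    simp only [List.foldl_cons]
    rw [inner_fold n g (fun i => PySem.Int.toStr (PySem.List.pyGetD r (i : Int) 0)) n le_rfl]
    have hcongr : (List.range n).map
        (fun k => if k < n then g k ++ PySem.Int.toStr (PySem.List.pyGetD r (k : Int) 0) else g k)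
        = (List.range n).map (fun k => g k ++ PySem.Int.toStr (r.getD k 0)) := by
      apply List.map_congr_left
      intro k hk
      have : k < n := by simpa using hk
      simp [this, PySem.List.pyGetD_natCast]
    rw [hcongr, ih (fun r hr => h r (by simp [hr]))]
    apply List.map_congr_left
    intro k _
    simp [colCat, List.foldl_cons]

theorem replicate_eq_map_range (n : Nat) :
    List.replicate n ("" : String) = (List.range n).map (fun _ => "") := by
  apply List.ext_getElem <;> simp

-- ===== VERDICT (by name: the statement is the Claim_ definition above) =====
theorem get_oo_jj_spec : Claim_equal_get_oo_jj := by
  intro a _ hpre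
  obtain ⟨hne, hlen⟩ := hpre
  unfold Spec_get_oo_jj
  obtain ⟨r0, rs, rfl⟩ : ∃ r0 rs, a = r0 :: rs := by
    cases a with
    | nil => exact absurd rfl hne
    | cons x t => exact ⟨x, t, rfl⟩
  set a := r0 :: rs with ha
  set n := r0.length with hn
  have hlen' : ∀ r ∈ a, r.length = n := by
    intro r hr; simpa [ha] using hlen r hr
  -- the maximum of the row lengths is n
  have hmax : (PySem.List.max? (a.map (fun r => (r.length : Int))) (fun y => y)).getD 0
      = (n : Int) := by
    rw [ha]
    simp only [List.map_cons]
    rw [PySem.List.max?_id_cons]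
    simp only [Option.getD_some]
    rw [← hn]
    apply foldl_max_const
    intro x hx
    simp only [List.mem_map] at hx
    obtain ⟨r, hr, rfl⟩ := hx
    exact_mod_cast hlen' r (by simp [ha, hr])
  -- B side
  have hB : get_oo_jj_alt a
      = (List.range n).map (fun k => colCat (a.map (fun r => r.getD k 0)) "") := by
    unfold get_oo_jj_alt
    simp only []
    rw [hmax]
    have htn : ((n : Int)).toNat = n := by omega
    rw [htn, replicate_eq_map_range, outer_fold a n hlen' (fun _ => "")]
  -- A side
  have hA : get_oo_jj a
      = (List.range n).map (fun k => colCat (a.map (fun r => r.getD k 0)) "") := by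
    unfold get_oo_jj
    simp only []
    have h1 : (PySem.List.pyRange 0 (a.length : Int)).foldl
        (fun acc i => acc ++ [((PySem.List.pyGetD a i []).length : Int)]) []
        = a.map (fun r => (r.length : Int)) := by
      rw [PySem.List.foldl_pyRange_zero_pyGetD' a [] (fun acc r => acc ++ [(r.length : Int)]) []]
      rw [foldl_append_singleton]
      simp
    rw [h1, hmax]
    rw [PySem.List.pyRange_zero_natCast n]
    rw [List.foldl_map]
    rw [foldl_append_singleton (List.range n)
      (fun k => (PySem.List.pyRange 0 (a.length : Int)).foldl
        (fun _string m => _string ++ PySem.Int.toStr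
          (PySem.List.pyGetD (PySem.List.pyGetD a m []) ((k : Int)) 0)) "") []]
    simp only [List.nil_append]
    apply List.map_congr_left
    intro k _
    rw [PySem.List.foldl_pyRange_zero_pyGetD' a []
      (fun s r => s ++ PySem.Int.toStr (PySem.List.pyGetD r ((k : Int)) 0)) ""]
    unfold colCat
    rw [List.foldl_map]
    simp only [PySem.List.pyGetD_natCast]
  rw [hA, hB]
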